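-- pv_equiv track=rewrite | github.com/LU1IN001/S1_TME-TD | TP3/Ex_4-5_Axel_Danappe-Laclef_Wilhem_Blondel.py | nb_couples_divise
-- ===== SOURCE A (Python) =====
-- def nb_couples_divise(n: int, p: int) -> int:
--     """Préconditions: n <= p
--     Retourne le nombre de couple d'entiers distincts qui se divise dans l'intervalle [n,p]
--     """
--     i: int = n
--     j: int = n
--     nb_couple: int = 0
--     while i <= p:
--         while j <= p:
--             if(i < j and i != 0 and j % i == 0):
--                 nb_couple = nb_couple + 1
--             j = j + 1
--         i = i + 1
--         j = n
--     return nb_couple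
-- ===== SOURCE B (Python) =====
-- def nb_couples_divise(n: int, p: int) -> int:
--     """For each nonzero i in [n,p], add the closed-form count of multiples of i in (i,p]."""
--     total = 0
--     for i in range(n, p + 1):
--         if i != 0:
--             d = abs(i)
--             total += p // d - i // d
--     return total
-- ===== Notes on version B (the rewrite author's own statement) =====
-- stated objective: alternative
-- what changed: Replaced the nested while-loop scan over all pairs (i,j) by a single loop that, for every nonzero i in [n,p], adds the count of multiples of i in (i,p] in closed form as p//abs(i) - i//abs(i).
import Mathlib
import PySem

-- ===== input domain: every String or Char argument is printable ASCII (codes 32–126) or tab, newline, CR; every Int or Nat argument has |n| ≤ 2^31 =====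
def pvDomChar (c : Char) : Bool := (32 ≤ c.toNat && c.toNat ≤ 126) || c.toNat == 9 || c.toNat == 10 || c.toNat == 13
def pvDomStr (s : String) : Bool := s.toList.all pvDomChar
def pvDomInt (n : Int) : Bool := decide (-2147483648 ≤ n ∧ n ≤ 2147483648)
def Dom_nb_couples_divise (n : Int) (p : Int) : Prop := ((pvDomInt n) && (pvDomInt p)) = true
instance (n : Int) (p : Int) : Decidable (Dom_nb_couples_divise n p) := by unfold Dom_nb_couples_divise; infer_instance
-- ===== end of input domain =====

-- B replaces A's nested pair scan by a single loop adding, per nonzero i, the closed-form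
-- count p//|i| - i//|i| of multiples of i in (i,p]  (objective: alternative algorithm).

-- ===== PORT A =====
-- inner 'while j <= p' loop of A; the Nat fuel only makes the recursion structural, it is
-- always called with enough fuel ((p+1-j).toNat) to exhaust the loop condition j ≤ p.
def pvInnerA (i p : Int) (fuel : Nat) (j acc : Int) : Int :=
  match fuel with
  | 0 => acc
  | fuel + 1 =>
      if j ≤ p then
        pvInnerA i p fuel (j + 1)
          (if i < j ∧ i ≠ 0 ∧ PySem.Int.mod j i = 0 then acc + 1 else acc)
      else acc

-- outer 'while i <= p' loop of A (j reset to n each iteration); same fuel discipline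
def pvOuterA (n p : Int) (fuel : Nat) (i acc : Int) : Int :=
  match fuel with
  | 0 => acc
  | fuel + 1 =>
      if i ≤ p then
        pvOuterA n p fuel (i + 1) (pvInnerA i p (p + 1 - n).toNat n acc)
      else acc

def nb_couples_divise (n : Int) (p : Int) : Int := pvOuterA n p (p + 1 - n).toNat n 0

-- ===== PORT B =====
def nb_couples_divise_alt (n : Int) (p : Int) : Int :=
  (PySem.List.pyRange n (p + 1) 1).foldl
    (fun total i =>
      if i ≠ 0 then
        total + (PySem.Int.floordiv p |i| - PySem.Int.floordiv i |i|)
      else total) 0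

-- ===== PRECONDITION & SPEC =====
def Spec_nb_couples_divise (n : Int) (p : Int) (out : Int) : Prop := out = nb_couples_divise_alt n p
instance (n : Int) (p : Int) (out : Int) : Decidable (Spec_nb_couples_divise n p out) := by unfold Spec_nb_couples_divise; infer_instance

-- ===== CLAIM (what is proved, stated in full; the proofs are below) =====
def Claim_equal_nb_couples_divise : Prop := ∀ (n : Int) (p : Int), Dom_nb_couples_divise n p → Spec_nb_couples_divise n p (nb_couples_divise n p)

-- ===== LEMMAS AND PROOFS =====

-- floor-division step: j//d minus (j-1)//d is 1 exactly when d divides j (d > 0)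
theorem pv_fdiv_step (d j : Int) (hd : 0 < d) :
    PySem.Int.floordiv j d =
      PySem.Int.floordiv (j - 1) d + (if d ∣ j then 1 else 0) := by
  have hq := (PySem.Int.floordiv_eq_iff_of_pos (a := j - 1) (b := d)
    (q := PySem.Int.floordiv (j - 1) d) hd).mp rfl
  obtain ⟨h1, h2⟩ := hq
  set q := PySem.Int.floordiv (j - 1) d with hqdef
  by_cases h : d ∣ j
  · rw [if_pos h]
    obtain ⟨k, hk⟩ := h
    rw [PySem.Int.floordiv_eq_iff_of_pos (a := j) (b := d) (q := q + 1) hd]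
    have hqk : q < k := by
      have : q * d < k * d := by rw [mul_comm k d, ← hk]; omega
      exact lt_of_mul_lt_mul_right this hd.le
    constructor
    · have : (q + 1) * d ≤ k * d := by
        apply mul_le_mul_of_nonneg_right _ hd.le; omega
      rw [mul_comm k d] at this; omega
    · have : d * k < (q + 1 + 1) * d := by
        rw [← hk]; ring_nf; ring_nf at h2; omega
      omega
  · rw [if_neg h, add_zero]
    rw [PySem.Int.floordiv_eq_iff_of_pos (a := j) (b := d) (q := q) hd]
    refine ⟨by omega, ?_⟩
    rcases lt_or_eq_of_le (show j ≤ (q + 1) * d by omega) with hlt | heq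
    · exact hlt
    · exact absurd ⟨q + 1, by rw [heq]; ring⟩ h

-- A's inner loop never counts anything when i = 0
theorem pv_innerA_zero (p : Int) : ∀ (k : Nat) (j acc : Int), pvInnerA 0 p k j acc = acc := by
  intro k
  induction k with
  | zero => intro j acc; rfl
  | succ k ih =>
      intro j acc
      rw [pvInnerA]
      by_cases hle : j ≤ p
      · simp only [hle, if_true]
        rw [ih]
        simp
      · simp [hle]

-- A's inner loop, phase past i: counts the multiples of i in [j, p]
theorem pv_innerA_past (i p : Int) (hi : i ≠ 0) : ∀ (k : Nat) (j acc : Int),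
    i < j → j ≤ p + 1 → (p + 1 - j).toNat = k →
    pvInnerA i p k j acc =
      acc + (PySem.Int.floordiv p |i| - PySem.Int.floordiv (j - 1) |i|) := by
  intro k
  induction k with
  | zero =>
      intro j acc hij hjp hk
      have hj : j = p + 1 := by omega
      rw [pvInnerA, hj]
      simp
  | succ k ih =>
      intro j acc hij hjp hk
      have hle : j ≤ p := by omega
      rw [pvInnerA]
      simp only [hle, if_true]
      rw [ih (j + 1) _ (by omega) (by omega) (by omega)]
      have hd : 0 < |i| := abs_pos.mpr hi
      have hcond : (i < j ∧ i ≠ 0 ∧ PySem.Int.mod j i = 0) ↔ |i| ∣ j := by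
        rw [PySem.Int.mod_eq_zero_iff_dvd, abs_dvd]
        exact ⟨fun h => h.2.2, fun h => ⟨hij, hi, h⟩⟩
      have hstep := pv_fdiv_step |i| j hd
      by_cases hdvd : |i| ∣ j
      · rw [if_pos (hcond.mpr hdvd)]
        rw [if_pos hdvd] at hstep
        simp only [add_sub_cancel_right]
        omega
      · rw [if_neg (fun h => hdvd (hcond.mp h))]
        rw [if_neg hdvd] at hstep
        simp only [add_sub_cancel_right]
        omega

-- A's inner loop from j ≤ i+1 with exact fuel: total count is p//|i| - i//|i|
theorem pv_innerA_count (i p : Int) (hi : i ≠ 0) (hip : i ≤ p) : ∀ (m : Nat) (j acc : Int),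
    j ≤ i + 1 → (i + 1 - j).toNat = m →
    pvInnerA i p (p + 1 - j).toNat j acc =
      acc + (PySem.Int.floordiv p |i| - PySem.Int.floordiv i |i|) := by
  intro m
  induction m with
  | zero =>
      intro j acc hj hm
      have hj' : j = i + 1 := by omega
      rw [pv_innerA_past i p hi (p + 1 - j).toNat j acc (by omega) (by omega) rfl, hj']
      simp
  | succ m ih =>
      intro j acc hj hm
      have hle : j ≤ p := by omega
      have hfuel : (p + 1 - j).toNat = (p + 1 - (j + 1)).toNat + 1 := by omega
      rw [hfuel, pvInnerA]
      simp only [hle, if_true]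
      rw [if_neg (by rintro ⟨h1, -, -⟩; omega)]
      exact ih (j + 1) acc (by omega) (by omega)

-- A's outer loop equals B's fold over the remaining range
theorem pv_outerA_eq (n p : Int) : ∀ (k : Nat) (i acc : Int),
    n ≤ i → (p + 1 - i).toNat = k →
    pvOuterA n p k i acc =
      (PySem.List.pyRange i (p + 1) 1).foldl
        (fun total x =>
          if x ≠ 0 then
            total + (PySem.Int.floordiv p |x| - PySem.Int.floordiv x |x|)
          else total) acc := by
  intro k
  induction k with
  | zero =>
      intro i acc hni hk
      rw [pvOuterA, PySem.List.pyRange_one_eq_nil (by omega)]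
      rfl
  | succ k ih =>
      intro i acc hni hk
      have hle : i ≤ p := by omega
      rw [pvOuterA]
      simp only [hle, if_true]
      rw [PySem.List.pyRange_one_cons (by omega), List.foldl_cons]
      rw [ih (i + 1) _ (by omega) (by omega)]
      congr 1
      by_cases hi : i = 0
      · subst hi
        rw [pv_innerA_zero p (p + 1 - n).toNat n acc]
        simp
      · rw [pv_innerA_count i p hi hle (i + 1 - n).toNat n acc (by omega) rfl]
        simp [hi]

-- ===== VERDICT (by name: the statement is the Claim_ definition above) =====
theorem nb_couples_divise_spec : Claim_equal_nb_couples_divise := by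
  intro n p _
  unfold Spec_nb_couples_divise nb_couples_divise nb_couples_divise_alt
  exact pv_outerA_eq n p (p + 1 - n).toNat n 0 le_rfl rfl
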